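-- pv_equiv track=rewrite | github.com/imshrishk/Game-Of-Life | life.py | rotate_pattern
-- ===== SOURCE A (Python) =====
-- def rotate_pattern(pattern, direction):
--     #Rotates a pattern based on the specified direction.
--     if direction == "right":
--         return pattern
--     elif direction == "down":
--         return [(y, -x) for x, y in pattern]
--     elif direction == "left":
--         return [(-x, -y) for x, y in pattern]
--     elif direction == "up":
--         return [(-y, x) for x, y in pattern]
-- ===== SOURCE B (Python) =====
-- def rotate_pattern(pattern, direction):
--     turns = {"right": 0, "down": 1, "left": 2, "up": 3}.get(direction)
--     if turns is None:
--         return None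
--     result = pattern
--     for _ in range(turns):
--         result = [(y, -x) for x, y in result]
--     return result
-- ===== Notes on version B (the rewrite author's own statement) =====
-- stated objective: alternative
-- what changed: Replaces the four-way branch with four separate comprehensions by a direction-to-quarter-turn-count table and repeated application of one base rotation (y, -x).
-- outside the precondition, e.g. on rotate_pattern([(1, 2)], 'x'): A returns None, B returns None
import Mathlib
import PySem

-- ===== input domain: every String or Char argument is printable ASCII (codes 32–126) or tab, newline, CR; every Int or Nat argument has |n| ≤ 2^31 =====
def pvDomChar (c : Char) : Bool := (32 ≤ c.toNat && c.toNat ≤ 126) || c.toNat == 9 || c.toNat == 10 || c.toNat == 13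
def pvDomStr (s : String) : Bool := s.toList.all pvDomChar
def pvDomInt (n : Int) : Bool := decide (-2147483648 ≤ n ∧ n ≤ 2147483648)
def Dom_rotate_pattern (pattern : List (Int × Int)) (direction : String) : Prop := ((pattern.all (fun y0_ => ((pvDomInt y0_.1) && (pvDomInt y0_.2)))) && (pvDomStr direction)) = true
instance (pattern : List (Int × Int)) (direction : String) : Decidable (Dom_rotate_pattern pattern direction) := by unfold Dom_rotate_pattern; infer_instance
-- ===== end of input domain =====

-- B replaces the four-way branch by a quarter-turn-count table and repeated application of one base rotation; unknown directions (where both Pythons return None) are outside Pre_.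


-- ===== PORT A =====
def rotate_pattern (pattern : List (Int × Int)) (direction : String) : List (Int × Int) :=
  if direction == "right" then pattern
  else if direction == "down" then pattern.map (fun xy => (xy.2, -xy.1))
  else if direction == "left" then pattern.map (fun xy => (-xy.1, -xy.2))
  else if direction == "up" then pattern.map (fun xy => (-xy.2, xy.1))
  else []  -- Python falls through and returns None here; excluded by Pre_

-- ===== PORT B =====
-- one quarter turn, the body of B's loop
def pvRot1 (l : List (Int × Int)) : List (Int × Int) := l.map (fun xy => (xy.2, -xy.1))

def rotate_pattern_alt (pattern : List (Int × Int)) (direction : String) : List (Int × Int) :=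
  match PySem.Dict.get? (PySem.Dict.ofList [("right", 0), ("down", 1), ("left", 2), ("up", 3)]) direction with
  | none => []  -- Python B returns None here; excluded by Pre_
  | some turns => (List.range turns).foldl (fun result _ => pvRot1 result) pattern

-- ===== PRECONDITION & SPEC =====
-- Pre_ excludes unknown directions, on which A falls through and returns None (not a list).
def Pre_rotate_pattern (pattern : List (Int × Int)) (direction : String) : Prop :=
  direction = "right" ∨ direction = "down" ∨ direction = "left" ∨ direction = "up"
instance (pattern : List (Int × Int)) (direction : String) : Decidable (Pre_rotate_pattern pattern direction) := by unfold Pre_rotate_pattern; infer_instance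
def pvWitness_rotate_pattern : (List (Int × Int)) × String := ([(1, 2), (0, -3)], "down")
def Spec_rotate_pattern (pattern : List (Int × Int)) (direction : String) (out : List (Int × Int)) : Prop := out = rotate_pattern_alt pattern direction
instance (pattern : List (Int × Int)) (direction : String) (out : List (Int × Int)) : Decidable (Spec_rotate_pattern pattern direction out) := by unfold Spec_rotate_pattern; infer_instance

-- ===== CLAIM (what is proved, stated in full; the proofs are below) =====
def Claim_equal_rotate_pattern : Prop := ∀ (pattern : List (Int × Int)) (direction : String), Dom_rotate_pattern pattern direction → Pre_rotate_pattern pattern direction → Spec_rotate_pattern pattern direction (rotate_pattern pattern direction)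

-- ===== LEMMAS AND PROOFS =====

-- ===== VERDICT (by name: the statement is the Claim_ definition above) =====
theorem rotate_pattern_spec : Claim_equal_rotate_pattern := by
  intro pattern direction _ hpre
  unfold Spec_rotate_pattern
  rcases hpre with h | h | h | h <;> subst h <;>
    simp [rotate_pattern, rotate_pattern_alt, pvRot1, PySem.Dict.get?, PySem.Dict.ofList, PySem.Dict.update, PySem.Dict.empty, PySem.Dict.insert, PySem.Dict.items,
      List.range_succ]
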